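-- pv_equiv track=rewrite | github.com/google/filament | third_party/dawn/third_party/catapult/devil/devil/android/settings.py | _ParseContentRow
-- ===== SOURCE A (Python) =====
-- def _ParseContentRow(row):
--   """Parse key, value entries from a row string."""
--   # Example row:
--   # 'Row: 0 _id=13, name=logging_id2, value=-1fccbaa546705b05'
--   fields = row.split(', ')
--   key = None
--   value = ''
--   for field in fields:
--     k, _, v = field.partition('=')
--     if k == 'name':
--       key = v
--     elif k == 'value':
--       value = v
--   return key, value
-- ===== SOURCE B (Python) =====
-- def _ParseContentRow(row):
--   """Parse key, value entries from a row string."""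
--   fields = row.split(', ')
--
--   def _last(wanted):
--     # scan back-to-front, first hit is the last occurrence
--     for field in reversed(fields):
--       k, _, v = field.partition('=')
--       if k == wanted:
--         return v
--     return None
--
--   value = _last('value')
--   return _last('name'), value if value is not None else ''
-- ===== Notes on version B (the rewrite author's own statement) =====
-- stated objective: alternative
-- what changed: Replaces the single forward branch loop threading two scalar accumulators by two staged back-to-front searches with early exit (first hit when scanning reversed = last-wins), one per key.
import Mathlib
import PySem

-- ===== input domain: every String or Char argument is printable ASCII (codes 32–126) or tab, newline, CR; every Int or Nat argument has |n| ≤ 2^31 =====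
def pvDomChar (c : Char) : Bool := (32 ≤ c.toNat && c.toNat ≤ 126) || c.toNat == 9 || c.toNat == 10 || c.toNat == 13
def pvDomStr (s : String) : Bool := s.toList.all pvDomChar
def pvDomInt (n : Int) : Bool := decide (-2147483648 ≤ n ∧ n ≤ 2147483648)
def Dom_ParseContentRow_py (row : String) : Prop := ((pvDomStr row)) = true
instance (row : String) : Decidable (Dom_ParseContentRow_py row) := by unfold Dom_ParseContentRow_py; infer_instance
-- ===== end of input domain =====

-- B replaces A's forward branch loop threading two scalar accumulators by two staged
-- back-to-front searches with early exit (first hit on the reversed field list = last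
-- occurrence), one per key (alternative decomposition, same cost).

-- ===== PORT A =====
-- field.partition('=') on the char list: (before, some after) if '=' occurs, else (field, none)
def pvPartChars : List Char → List Char × Option (List Char)
  | [] => ([], none)
  | c :: t =>
    if c = '=' then ([], some t)
    else
      let r := pvPartChars t
      (c :: r.1, r.2)

-- exact port of s.partition('=') : returns (head, sep, tail)
def pvPartitionEq (s : String) : String × String × String :=
  match pvPartChars s.toList with
  | (a, none) => (String.ofList a, "", "")
  | (a, some b) => (String.ofList a, "=", String.ofList b)

-- loop body of A: the if/elif over the state (key, value)
def pvStepA (st : Option String × String) (field : String) : Option String × String :=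
  let p := pvPartitionEq field
  if p.1 = "name" then (some p.2.2, st.2)
  else if p.1 = "value" then (st.1, p.2.2)
  else st

def ParseContentRow_py (row : String) : Option String × String :=
  let fields := (PySem.Chars.splitOn row.toList [',', ' ']).map String.ofList
  fields.foldl pvStepA (none, "")

-- ===== PORT B =====
-- B's inner helper _last(wanted): iterate the reversed field list, return v on the
-- first field whose part before the first '=' equals wanted; None if none matches.
def pvLastB (wanted : String) : List String → Option String
  | [] => none
  | f :: t =>
    let p := pvPartitionEq f
    if p.1 = wanted then some p.2.2 else pvLastB wanted t

def ParseContentRow_py_alt (row : String) : Option String × String :=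
  let fields := (PySem.Chars.splitOn row.toList [',', ' ']).map String.ofList
  let value := pvLastB "value" fields.reverse
  (pvLastB "name" fields.reverse, match value with | some v => v | none => "")

-- ===== PRECONDITION & SPEC =====
def Spec_ParseContentRow_py (row : String) (out : Option String × String) : Prop := out = ParseContentRow_py_alt row
instance (row : String) (out : Option String × String) : Decidable (Spec_ParseContentRow_py row out) := by unfold Spec_ParseContentRow_py; infer_instance

-- ===== CLAIM =====
def Claim_equal_ParseContentRow_py : Prop := ∀ (row : String), Dom_ParseContentRow_py row → Spec_ParseContentRow_py row (ParseContentRow_py row)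

-- ===== LEMMAS AND PROOFS =====
lemma pvLastB_append (w : String) (a b : List String) :
    pvLastB w (a ++ b) = match pvLastB w a with | some v => some v | none => pvLastB w b := by
  induction a with
  | nil => simp [pvLastB]
  | cons f t ih =>
    simp only [List.cons_append, pvLastB, ih]
    split <;> simp

-- Loop invariant: A's fold from state (k0, v0) is B's two reversed searches,
-- falling back to (k0, v0) when no field matches.
lemma pvInv (fields : List String) (k0 : Option String) (v0 : String) :
    fields.foldl pvStepA (k0, v0)
      = ((match pvLastB "name" fields.reverse with | some v => some v | none => k0),
         (match pvLastB "value" fields.reverse with | some v => v | none => v0)) := by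
  induction fields generalizing k0 v0 with
  | nil => simp [pvLastB]
  | cons f t ih =>
    rw [List.foldl_cons, ih, List.reverse_cons, pvLastB_append, pvLastB_append]
    cases hn : pvLastB "name" t.reverse <;> cases hv : pvLastB "value" t.reverse <;>
      by_cases h1 : (pvPartitionEq f).1 = "name" <;>
      by_cases h2 : (pvPartitionEq f).1 = "value" <;>
      simp_all [pvStepA, pvLastB]

-- ===== VERDICT =====
theorem ParseContentRow_py_spec : Claim_equal_ParseContentRow_py := by
  intro row _
  unfold Spec_ParseContentRow_py ParseContentRow_py ParseContentRow_py_alt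
  rw [pvInv]
  split <;> split <;> simp_all
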